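-- pv_equiv track=rewrite | github.com/KiemLab-RIS/CellTag-barcoding | buildCloneID.py | getTagList
-- ===== SOURCE A (Python) =====
-- from collections import defaultdict
--
-- def getTagList(cbc,cellList):
--   allTags = defaultdict(int)
--   for cell in cellList:
--     tags = sorted(list(cbc[cell].keys()))
--     for tag in tags:
--       allTags[tag] += 1
--   #
--   # sort to find tags with most counts
--   #   return tags in order of most common
--   #
--   sd = sorted(allTags.items(),key=lambda x:x[1],reverse=True)
--   rt = []
--   for t,c in sd:
--     rt.append(t)
--
--   return(rt)
-- ===== SOURCE B (Python) =====
-- def getTagList(cbc, cellList):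
--     allTags = {}
--     for cell in cellList:
--         for tag in sorted(cbc[cell].keys()):
--             allTags[tag] = allTags.get(tag, 0) + 1
--     # bucket (counting) sort by count instead of a comparison sort
--     maxc = 0
--     for c in allTags.values():
--         if c > maxc:
--             maxc = c
--     buckets = {}
--     for t, c in allTags.items():
--         buckets[c] = buckets.get(c, []) + [t]
--     rt = []
--     c = maxc
--     while c > 0:
--         rt += buckets.get(c, [])
--         c -= 1
--     return rt
-- ===== Notes on version B (the rewrite author's own statement) =====
-- stated objective: alternative
-- what changed: The final ordering by descending count is done by a counting/bucket pass (max count, buckets filled in dict insertion order, concatenated from the max count down) instead of a comparison sort of allTags.items(); the counting phase is kept.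
import Mathlib
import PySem

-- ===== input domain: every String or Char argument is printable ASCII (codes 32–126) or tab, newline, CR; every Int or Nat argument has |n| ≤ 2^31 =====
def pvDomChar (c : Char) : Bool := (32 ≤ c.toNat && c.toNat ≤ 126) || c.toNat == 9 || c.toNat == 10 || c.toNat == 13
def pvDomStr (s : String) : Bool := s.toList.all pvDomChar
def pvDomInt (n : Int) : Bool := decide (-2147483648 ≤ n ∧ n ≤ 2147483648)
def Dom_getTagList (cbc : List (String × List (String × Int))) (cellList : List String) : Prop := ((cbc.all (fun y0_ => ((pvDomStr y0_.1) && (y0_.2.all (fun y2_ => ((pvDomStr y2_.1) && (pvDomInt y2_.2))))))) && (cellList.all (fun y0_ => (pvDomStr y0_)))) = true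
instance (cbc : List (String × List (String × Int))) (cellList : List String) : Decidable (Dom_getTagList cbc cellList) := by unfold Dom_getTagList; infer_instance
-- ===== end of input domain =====

-- B replaces the comparison sort of allTags.items() by a counting/bucket sort (buckets filled in
-- dict insertion order, read out from the maximum count down); same return value, alternative algorithm.

-- ===== PORT A =====
-- shared by both ports (B keeps A's counting phase): sorted(list(cbc[cell].keys())) —
-- first-match dict lookup, keys in first-occurrence order, then sorted.
-- (.getD [] is only reached outside Pre_getTagList, where Python raises KeyError.)
def pvCellTagsA (cbc : List (String × List (String × Int))) (cell : String) : List String :=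
  PySem.List.sorted
    (PySem.List.dedup ((((cbc.find? (fun p => p.1 == cell)).map (·.2)).getD []).map (·.1)))
    (fun t => t) false

def pvAllTagsA (cbc : List (String × List (String × Int))) (cellList : List String) :
    PySem.Dict String Int :=
  cellList.foldl
    (fun d cell => (pvCellTagsA cbc cell).foldl (fun d tag => d.modify tag 0 (· + 1)) d)
    PySem.Dict.empty

def getTagList (cbc : List (String × List (String × Int))) (cellList : List String) : List String :=
  let sd := PySem.List.sorted (pvAllTagsA cbc cellList).items (fun p => p.2) true
  sd.foldl (fun rt p => rt ++ [p.1]) []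

-- ===== PORT B =====
-- allTags[tag] = allTags.get(tag, 0) + 1
def pvAllTagsB (cbc : List (String × List (String × Int))) (cellList : List String) :
    PySem.Dict String Int :=
  cellList.foldl
    (fun d cell => (pvCellTagsA cbc cell).foldl (fun d tag => d.insert tag (d.getD tag 0 + 1)) d)
    PySem.Dict.empty

-- the 'while c > 0: rt += buckets.get(c, []); c -= 1' loop, fuel = c.toNat (c starts at maxc ≥ 0)
def pvDescConcat (buckets : PySem.Dict Int (List String)) : Nat → List String
  | 0 => []
  | k + 1 => buckets.getD ((k : Int) + 1) [] ++ pvDescConcat buckets k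

def getTagList_alt (cbc : List (String × List (String × Int))) (cellList : List String) : List String :=
  let allTags := pvAllTagsB cbc cellList
  let maxc := allTags.values.foldl (fun m c => if m < c then c else m) 0
  let buckets := allTags.items.foldl (fun d p => d.modify p.2 [] (· ++ [p.1])) PySem.Dict.empty
  pvDescConcat buckets maxc.toNat

-- ===== PRECONDITION & SPEC =====
-- Pre_ excludes exactly the inputs on which Python A raises KeyError (a cell of cellList missing from cbc).
def Pre_getTagList (cbc : List (String × List (String × Int))) (cellList : List String) : Prop :=
  ∀ cell ∈ cellList, cell ∈ cbc.map (·.1)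
instance (cbc : List (String × List (String × Int))) (cellList : List String) : Decidable (Pre_getTagList cbc cellList) := by unfold Pre_getTagList; infer_instance

def pvWitness_getTagList : (List (String × List (String × Int))) × List String :=
  ([("c1", [("t1", 1), ("t2", 2)]), ("c2", [("t2", 0)])], ["c1", "c2", "c1"])

def Spec_getTagList (cbc : List (String × List (String × Int))) (cellList : List String) (out : List String) : Prop := out = getTagList_alt cbc cellList
instance (cbc : List (String × List (String × Int))) (cellList : List String) (out : List String) : Decidable (Spec_getTagList cbc cellList out) := by unfold Spec_getTagList; infer_instance

-- ===== CLAIM (what is proved, stated in full; the proofs are below) =====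
def Claim_equal_getTagList : Prop := ∀ (cbc : List (String × List (String × Int))) (cellList : List String), Dom_getTagList cbc cellList → Pre_getTagList cbc cellList → Spec_getTagList cbc cellList (getTagList cbc cellList)

-- ===== LEMMAS AND PROOFS =====

-- both counting loops build Counter(flattened per-cell sorted tag lists)
theorem pvAllTagsA_eq_counter (cbc : List (String × List (String × Int))) (cellList : List String) :
    pvAllTagsA cbc cellList = PySem.Dict.counter (cellList.flatMap (pvCellTagsA cbc)) := by
  rw [pvAllTagsA, PySem.Dict.counter_eq_foldl, List.foldl_flatMap]

theorem pvAllTagsB_eq_counter (cbc : List (String × List (String × Int))) (cellList : List String) :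
    pvAllTagsB cbc cellList = PySem.Dict.counter (cellList.flatMap (pvCellTagsA cbc)) := by
  rw [pvAllTagsB, ← PySem.Dict.foldl_insert_getD_add_one_eq_counter, List.foldl_flatMap]

theorem insertBy_append_left {α : Type} (before : α → α → Bool) (x : α) (l1 l2 : List α)
    (h : ∀ y ∈ l1, before x y = false) :
    PySem.List.insertBy before x (l1 ++ l2) = l1 ++ PySem.List.insertBy before x l2 := by
  induction l1 with
  | nil => rfl
  | cons a l1 ih =>
      simp only [List.cons_append, PySem.List.insertBy, h a (by simp)]
      simp only [Bool.false_eq_true, if_false, List.cons_inj_right]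
      exact ih (fun y hy => h y (by simp [hy]))

theorem insertBy_all_before {α : Type} (before : α → α → Bool) (x : α) (l : List α)
    (h : ∀ y ∈ l, before x y = true) :
    PySem.List.insertBy before x l = x :: l := by
  cases l with
  | nil => rfl
  | cons a l => simp [PySem.List.insertBy, h a (by simp)]

theorem flatMap_congr_mem {α β : Type} (l : List α) (f g : α → List β)
    (h : ∀ x ∈ l, f x = g x) : l.flatMap f = l.flatMap g := by
  simp only [List.flatMap_def]
  rw [List.map_congr_left h]

-- inserting x into the bucket concatenation puts it at the end of its own bucket
theorem insertBy_buckets {α : Type} (x : α × Int) (xs : List (α × Int)) (cs : List Int)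
    (hcs : cs.Pairwise (fun p q => q < p)) (hx : x.2 ∈ cs) :
    PySem.List.insertBy (fun p q => decide (q.2 < p.2)) x
        (cs.flatMap (fun c => xs.filter (fun p => p.2 == c)))
      = cs.flatMap (fun c => (xs ++ [x]).filter (fun p => p.2 == c)) := by
  induction cs with
  | nil => cases hx
  | cons c cs ih =>
      have hlt : ∀ c' ∈ cs, c' < c := fun c' hc' => (List.pairwise_cons.mp hcs).1 c' hc'
      have htail : cs.Pairwise (fun p q => q < p) := (List.pairwise_cons.mp hcs).2
      by_cases hxc : x.2 = c
      · have hnotin : x.2 ∉ cs := fun h => absurd (hlt _ h) (by omega)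
        rw [List.flatMap_cons, List.flatMap_cons,
            insertBy_append_left _ _ _ _ (by
              intro y hy
              have hy2 : y.2 = c := by simpa using (List.mem_filter.mp hy).2
              simp [hy2, hxc]),
            insertBy_all_before _ _ _ (by
              intro y hy
              simp only [List.mem_flatMap, List.mem_filter] at hy
              obtain ⟨c', hc', _, hy2⟩ := hy
              have hy2' : y.2 = c' := by simpa using hy2
              have := hlt c' hc'
              simp only [decide_eq_true_eq]
              omega),
            flatMap_congr_mem cs (fun c' => (xs ++ [x]).filter (fun p => p.2 == c'))
              (fun c' => xs.filter (fun p => p.2 == c')) (by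
            intro c' hc'
            have hne : x.2 ≠ c' := fun h => hnotin (h ▸ hc')
            simp [List.filter_append, hne])]
        have hfx : (xs ++ [x]).filter (fun p => p.2 == c) = xs.filter (fun p => p.2 == c) ++ [x] := by
          simp [List.filter_append, hxc]
        rw [hfx]
        simp
      · have hxcs : x.2 ∈ cs := by
          rcases List.mem_cons.mp hx with h | h
          · exact absurd h hxc
          · exact h
        have hxlt : x.2 < c := hlt _ hxcs
        rw [List.flatMap_cons, List.flatMap_cons,
            insertBy_append_left _ _ _ _ (by
              intro y hy
              have hy2 : y.2 = c := by simpa using (List.mem_filter.mp hy).2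
              simp only [decide_eq_false_iff_not]
              omega),
            ih htail hxcs]
        have hfx : (xs ++ [x]).filter (fun p => p.2 == c) = xs.filter (fun p => p.2 == c) := by
          have hne : x.2 ≠ c := hxc
          simp [List.filter_append, hne]
        rw [hfx]

-- stable reverse sort by an Int key = bucket concatenation over any strictly
-- decreasing list of counts covering all keys
theorem sorted_rev_eq_flatMap {α : Type} (xs : List (α × Int)) (cs : List Int)
    (hcs : cs.Pairwise (fun p q => q < p)) (hmem : ∀ p ∈ xs, p.2 ∈ cs) :
    PySem.List.sorted xs (fun p => p.2) true
      = cs.flatMap (fun c => xs.filter (fun p => p.2 == c)) := by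
  induction xs using List.reverseRecOn with
  | nil =>
      have h0 : cs.flatMap (fun c => ([] : List (α × Int)).filter (fun p => p.2 == c)) = [] := by
        induction cs with
        | nil => rfl
        | cons c cs _ => simp
      rw [h0]
      rfl
  | append_singleton xs x ih =>
      rw [PySem.List.sorted_rev_eq_foldl_insertBy, List.foldl_append, List.foldl_cons, List.foldl_nil,
          ← PySem.List.sorted_rev_eq_foldl_insertBy,
          ih (fun p hp => hmem p (by simp [hp]))]
      exact insertBy_buckets x xs cs hcs (hmem x (by simp))

-- the descending count list [k, k-1, ..., 1]
def pvDescList : Nat → List Int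
  | 0 => []
  | k + 1 => ((k : Int) + 1) :: pvDescList k

theorem mem_pvDescList (k : Nat) (c : Int) : c ∈ pvDescList k ↔ 1 ≤ c ∧ c ≤ (k : Int) := by
  induction k with
  | zero => simp [pvDescList]; omega
  | succ k ih =>
      simp only [pvDescList, List.mem_cons, ih]
      push_cast
      omega

theorem pvDescList_pairwise (k : Nat) : (pvDescList k).Pairwise (fun p q => q < p) := by
  induction k with
  | zero => exact List.Pairwise.nil
  | succ k ih =>
      refine List.pairwise_cons.mpr ⟨?_, ih⟩
      intro c hc
      have := (mem_pvDescList k c).mp hc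
      omega

theorem pvDescConcat_eq_flatMap (buckets : PySem.Dict Int (List String)) (k : Nat) :
    pvDescConcat buckets k = (pvDescList k).flatMap (fun c => buckets.getD c []) := by
  induction k with
  | zero => rfl
  | succ k ih => simp [pvDescConcat, pvDescList, ih]

-- ===== VERDICT (by name: the statement is the Claim_ definition above) =====
theorem getTagList_spec : Claim_equal_getTagList := by
  intro cbc cellList _ _
  show (PySem.List.sorted (pvAllTagsA cbc cellList).items (fun p => p.2) true).foldl
        (fun rt p => rt ++ [p.1]) []
      = pvDescConcat
          ((pvAllTagsB cbc cellList).items.foldl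
            (fun d p => d.modify p.2 [] (· ++ [p.1])) PySem.Dict.empty)
          ((pvAllTagsB cbc cellList).values.foldl (fun m c => if m < c then c else m) 0).toNat
  rw [pvAllTagsA_eq_counter, pvAllTagsB_eq_counter]
  set L := cellList.flatMap (pvCellTagsA cbc) with hL
  set items := (PySem.Dict.counter L).items with hitems
  rw [PySem.List.foldl_append_singleton_eq_map]
  set maxc := (PySem.Dict.counter L).values.foldl (fun m c => if m < c then c else m) 0 with hmax
  have hfun : (fun (m c : Int) => if m < c then c else m) = fun (m c : Int) => max m c := by
    funext m c
    rw [max_def]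
    split_ifs <;> omega
  have hmax_eq : maxc = (PySem.Dict.counter L).values.foldl (fun m c => max m c) 0 := by
    rw [hmax, hfun]
  have hbounds := PySem.List.le_foldl_max_int ((PySem.Dict.counter L).values) (fun x => x) 0
  have hmax_nonneg : 0 ≤ maxc := by rw [hmax_eq]; exact hbounds.1
  have hval_le : ∀ v ∈ (PySem.Dict.counter L).values, v ≤ maxc := by
    intro v hv; rw [hmax_eq]; exact hbounds.2 v hv
  have hmem : ∀ p ∈ items, p.2 ∈ pvDescList maxc.toNat := by
    intro p hp
    rw [mem_pvDescList]
    refine ⟨?_, ?_⟩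
    · rw [hitems, PySem.Dict.items_counter] at hp
      simp only [List.mem_map] at hp
      obtain ⟨t, ht, rfl⟩ := hp
      have htL : t ∈ L := by simpa [PySem.Set.mem_ofList] using ht
      have hc : 0 < List.count t L := List.count_pos_iff.mpr htL
      have hc' : (1 : Int) ≤ (List.count t L : Int) := by exact_mod_cast hc
      exact hc'
    · have hv : p.2 ∈ (PySem.Dict.counter L).values := by
        simp only [PySem.Dict.values]
        exact List.mem_map.mpr ⟨p, hp, rfl⟩
      have := hval_le _ hv
      omega
  rw [sorted_rev_eq_flatMap items (pvDescList maxc.toNat) (pvDescList_pairwise _) hmem,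
      pvDescConcat_eq_flatMap]
  have hbucket : ∀ c : Int,
      (items.foldl (fun d p => d.modify p.2 [] (· ++ [p.1])) PySem.Dict.empty).getD c []
        = (items.filter (fun p => p.2 == c)).map (fun p => p.1) := by
    intro c
    have hswap : items.foldl (fun d p => d.modify p.2 [] (· ++ [p.1])) PySem.Dict.empty
        = (items.map (fun p => (p.2, p.1))).foldl
            (fun d p => d.modify p.1 [] (· ++ [p.2])) PySem.Dict.empty := by
      rw [List.foldl_map]
    rw [hswap, PySem.Dict.getD_foldl_modify_append]
    simp [List.filter_map, List.map_map, Function.comp_def]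
  rw [flatMap_congr_mem (pvDescList maxc.toNat) _ _ (fun c _ => hbucket c),
      List.map_flatMap]
  simp
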